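-- pv_equiv track=rewrite | github.com/ADALIV/Algorithm | 프로그래머스/2/169199. 리코쳇 로봇/리코쳇 로봇.py | solution
-- ===== SOURCE A (Python) =====
-- from collections import deque
--
-- def solution(board):
--     answer = -1
--     row = len(board)
--     col = len(board[0])
--     way = [(0, 1), (0, -1), (1, 0), (-1, 0)]
--
--     for y in range(0, row):
--         for x in range(0, col):
--             if board[y][x] == "R":
--                 Ry, Rx = y, x
--             if board[y][x] == "G":
--                 Gy, Gx = y, x
--     visit = [[False for i in range(0, col)] for j in range(0, row)]
--     q = deque()
--     q.append((Ry, Rx, 0))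
--     visit[Ry][Rx] = True
--
--     while q:
--         y, x, time = q.popleft()
--         if Gy == y and Gx == x:
--             answer = time
--             break
--
--         for wayY, wayX in way:
--             newY, newX = y, x
--             while 1:
--                 newY += wayY
--                 newX += wayX
--                 if newX<0 or newX>=col or newY<0 or newY>=row or board[newY][newX] == "D":
--                     if visit[newY-wayY][newX-wayX] == False:
--                         visit[newY-wayY][newX-wayX] = True
--                         q.append((newY-wayY, newX-wayX, time+1))
--                     break
--     return answer
-- ===== SOURCE B (Python) =====
-- def solution(board):
--     rows, cols = len(board), len(board[0])
--     way = ((0, 1), (0, -1), (1, 0), (-1, 0))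
--
--     def stop(y, x, dy, dx):
--         while True:
--             ny, nx = y + dy, x + dx
--             if nx < 0 or nx >= cols or ny < 0 or ny >= rows or board[ny][nx] == "D":
--                 return (y, x)
--             y, x = ny, nx
--
--     start = goal = None
--     for y in range(rows):
--         for x in range(cols):
--             if board[y][x] == "R":
--                 start = (y, x)
--             elif board[y][x] == "G":
--                 goal = (y, x)
--
--     table = [[[q for q in (stop(y, x, dy, dx) for dy, dx in way) if q != (y, x)]
--               for x in range(cols)] for y in range(rows)]
--
--     visited = [[False] * cols for _ in range(rows)]
--     visited[start[0]][start[1]] = True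
--     frontier = [start]
--     d = 0
--     while frontier:
--         if goal in frontier:
--             return d
--         nxt = []
--         for (y, x) in frontier:
--             for (ny, nx) in table[y][x]:
--                 if not visited[ny][nx]:
--                     visited[ny][nx] = True
--                     nxt.append((ny, nx))
--         frontier = nxt
--         d += 1
--     return -1
-- ===== Notes on version B (the rewrite author's own statement) =====
-- stated objective: alternative
-- what changed: B first materializes a slide-transition table (for every cell and direction, the cell where the robot stops, self-moves omitted) and then runs a plain level-by-level BFS over that precomputed adjacency, instead of A's single queue of (y,x,time) triples that re-simulates the slide inline while searching.
import Mathlib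
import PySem

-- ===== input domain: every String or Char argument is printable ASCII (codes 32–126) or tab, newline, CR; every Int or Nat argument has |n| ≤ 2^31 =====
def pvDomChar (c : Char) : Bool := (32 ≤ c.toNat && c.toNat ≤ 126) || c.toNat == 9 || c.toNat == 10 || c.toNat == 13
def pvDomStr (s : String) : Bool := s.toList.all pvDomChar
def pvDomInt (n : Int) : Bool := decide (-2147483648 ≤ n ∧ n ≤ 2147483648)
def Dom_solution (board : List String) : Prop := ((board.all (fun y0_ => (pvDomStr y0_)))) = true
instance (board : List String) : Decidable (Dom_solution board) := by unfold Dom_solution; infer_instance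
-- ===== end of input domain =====

-- B replaces A's queue of (y,x,time) triples with an inline slide by a precomputed
-- slide-transition table plus a level-by-level BFS over it (objective: alternative, same cost).

-- ===== PORT A =====
-- Shared board-geometry helpers: both Pythons read board[y][x], slide the robot the
-- same way, and mark a visited matrix the same way, so these helpers serve both ports.
-- pvCell is exact for the indices reached on inputs satisfying Pre_solution
-- (0 ≤ y < len(board), 0 ≤ x < len(board[0]); Python would raise outside).
def pvCell (board : List String) (y x : Int) : Char :=
  (PySem.List.pyGet? ((PySem.List.pyGet? board y).getD "").toList x).getD ' '

def pvWay : List (Int × Int) := [(0, 1), (0, -1), (1, 0), (-1, 0)]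

-- the inner `while 1` slide of A = the `stop` helper of B (identical Python logic);
-- fuel (row+col)+1 bounds the number of one-cell moves, which never exceeds row+col.
def pvSlide (board : List String) (row col : Int) : Nat → Int → Int → Int → Int → Int × Int
  | 0, y, x, _, _ => (y, x)
  | fuel + 1, y, x, dy, dx =>
    let ny := y + dy
    let nx := x + dx
    if nx < 0 ∨ col ≤ nx ∨ ny < 0 ∨ row ≤ ny ∨ pvCell board ny nx = 'D' then (y, x)
    else pvSlide board row col fuel ny nx dy dx

-- the scan `for y in range(row): for x in range(col): if board[y][x] == c: …`
-- keeping the LAST occurrence, as both Pythons do; none = the name was never bound.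
def pvScan (board : List String) (row col : Int) (c : Char) : Option (Int × Int) :=
  (PySem.List.pyRange 0 row 1).foldl
    (fun acc y =>
      (PySem.List.pyRange 0 col 1).foldl
        (fun acc x => if pvCell board y x = c then some (y, x) else acc) acc)
    none

-- visited-matrix read/write; exact for 0 ≤ y, 0 ≤ x (the only indices reached under Pre_solution)
def pvVget (v : List (List Bool)) (y x : Int) : Bool :=
  (v.getD y.toNat []).getD x.toNat false

def pvVset (v : List (List Bool)) (y x : Int) : List (List Bool) :=
  v.set y.toNat ((v.getD y.toNat []).set x.toNat true)

-- A's body of `for wayY, wayX in way:` for the popped cell (y,x) at time t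
def pvStepA (board : List String) (row col : Int) (y x t : Int)
    (st : List (List Bool) × List (Int × Int × Int)) (d : Int × Int) :
    List (List Bool) × List (Int × Int × Int) :=
  let p := pvSlide board row col ((row + col).toNat + 1) y x d.1 d.2
  if pvVget st.1 p.1 p.2 then st else (pvVset st.1 p.1 p.2, st.2 ++ [(p.1, p.2, t + 1)])

-- A's `while q:` loop; fuel row*col+1 bounds the number of pops (each pop was an
-- enqueue, and each enqueue marks a previously unmarked cell of the row×col grid).
def pvLoopA (board : List String) (row col : Int) (g : Int × Int) :
    Nat → List (List Bool) → List (Int × Int × Int) → Int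
  | 0, _, _ => -1
  | fuel + 1, v, q =>
    match q with
    | [] => -1
    | (y, x, t) :: rest =>
      if g.1 = y ∧ g.2 = x then t
      else
        let st := pvWay.foldl (pvStepA board row col y x t) (v, ([] : List (Int × Int × Int)))
        pvLoopA board row col g fuel st.1 (rest ++ st.2)

def solution (board : List String) : Int :=
  let row : Int := board.length
  let col : Int := ((board.headD "").toList.length : Int)   -- len(board[0]); [] excluded by Pre_
  match pvScan board row col 'R', pvScan board row col 'G' with
  | some r, some g =>
    let v0 := pvVset (List.replicate board.length (List.replicate col.toNat false)) r.1 r.2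
    pvLoopA board row col g (board.length * col.toNat + 1) v0 [(r.1, r.2, 0)]
  | _, _ => -1   -- Python raises NameError here (no R or no G); excluded by Pre_solution

-- ===== PORT B =====
-- the transition table: for each cell the four slide stops, self-moves omitted
def pvStops (board : List String) (row col : Int) (y x : Int) : List (Int × Int) :=
  (pvWay.map (fun d => pvSlide board row col ((row + col).toNat + 1) y x d.1 d.2)).filter
    (fun q => q ≠ (y, x))

def pvTable (board : List String) (row col : Int) : List (List (List (Int × Int))) :=
  (PySem.List.pyRange 0 row 1).map
    (fun y => (PySem.List.pyRange 0 col 1).map (fun x => pvStops board row col y x))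

def pvTableAt (tb : List (List (List (Int × Int)))) (y x : Int) : List (Int × Int) :=
  (tb.getD y.toNat []).getD x.toNat []

-- B's `if not visited: mark and append` for one table neighbour
def pvStepB (st : List (List Bool) × List (Int × Int)) (q : Int × Int) :
    List (List Bool) × List (Int × Int) :=
  if pvVget st.1 q.1 q.2 then st else (pvVset st.1 q.1 q.2, st.2 ++ [q])

-- B's `while frontier:` loop; fuel row*col+1 bounds the number of levels
def pvLoopB (tb : List (List (List (Int × Int)))) (g : Int × Int) :
    Nat → List (List Bool) → List (Int × Int) → Int → Int
  | 0, _, _, _ => -1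
  | fuel + 1, v, frontier, d =>
    if frontier = [] then -1
    else if g ∈ frontier then d
    else
      let st := frontier.foldl (fun st p => (pvTableAt tb p.1 p.2).foldl pvStepB st)
        (v, ([] : List (Int × Int)))
      pvLoopB tb g fuel st.1 st.2 (d + 1)

def solution_alt (board : List String) : Int :=
  let row : Int := board.length
  let col : Int := ((board.headD "").toList.length : Int)
  match pvScan board row col 'R' with
  | none => -1           -- no R: B's Python raises; excluded by Pre_solution
  | some r =>
    match pvScan board row col 'G' with
    | none => -1         -- no G: B's BFS exhausts the reachable cells and returns -1
    | some g =>
      let tb := pvTable board row col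
      let v0 := pvVset (List.replicate board.length (List.replicate col.toNat false)) r.1 r.2
      pvLoopB tb g (board.length * col.toNat + 1) v0 [r] 0

-- ===== PRECONDITION & SPEC =====
-- Pre_ excludes exactly the inputs where Python A raises: the empty board (IndexError on
-- board[0]), boards with a row shorter than row 0 (IndexError while scanning), and boards
-- without an 'R' or without a 'G' among the first len(board[0]) columns (NameError).
def Pre_solution (board : List String) : Prop :=
  board ≠ [] ∧
  (∀ s ∈ board, (board.headD "").toList.length ≤ s.toList.length) ∧
  (∃ s ∈ board, 'R' ∈ s.toList.take (board.headD "").toList.length) ∧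
  (∃ s ∈ board, 'G' ∈ s.toList.take (board.headD "").toList.length)

instance (board : List String) : Decidable (Pre_solution board) := by
  unfold Pre_solution; infer_instance

def pvWitness_solution : List String := ["RG"]

def Spec_solution (board : List String) (out : Int) : Prop := out = solution_alt board
instance (board : List String) (out : Int) : Decidable (Spec_solution board out) := by
  unfold Spec_solution; infer_instance

-- ===== CLAIM (what is proved, stated in full; the proofs are below) =====
def Claim_equal_solution : Prop :=
  ∀ (board : List String), Dom_solution board → Pre_solution board →
    Spec_solution board (solution board)

-- ===== LEMMAS AND PROOFS =====

-- a cell of the row×col grid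
def PvGood (row col : Int) (p : Int × Int) : Prop :=
  0 ≤ p.1 ∧ p.1 < row ∧ 0 ≤ p.2 ∧ p.2 < col

-- a well-shaped visited matrix
def PvShape (row col : Int) (v : List (List Bool)) : Prop :=
  v.length = row.toNat ∧ ∀ r ∈ v, r.length = col.toNat

-- number of unmarked cells
def pvMu (v : List (List Bool)) : Nat :=
  (v.map (fun r => r.countP (fun b => !b))).sum

theorem pvRowGet_set_mono (r : List Bool) (i j : Nat) (h : r[j]?.getD false = true) :
    (r.set i true)[j]?.getD false = true := by
  rw [List.getElem?_set]
  split_ifs with h1 h2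
  · simp
  · subst h1; simp_all
  · exact h

theorem pvVget_vset_mono (v : List (List Bool)) (y x y' x' : Int)
    (h : pvVget v y' x' = true) : pvVget (pvVset v y x) y' x' = true := by
  simp only [pvVget, pvVset, List.getD_eq_getElem?_getD] at h ⊢
  rw [List.getElem?_set]
  split_ifs with h1 h2
  · rw [← h1] at h
    simp only [Option.getD_some]
    exact pvRowGet_set_mono _ _ _ h
  · rw [← h1, List.getElem?_eq_none (le_of_not_gt h2)] at h
    simp at h
  · exact h

theorem pvShape_vset (row col : Int) (v : List (List Bool)) (y x : Int)
    (hsh : PvShape row col v) : PvShape row col (pvVset v y x) := by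
  obtain ⟨h1, h2⟩ := hsh
  unfold pvVset
  rcases Nat.lt_or_ge y.toNat v.length with hl | hl
  · refine ⟨by simpa using h1, ?_⟩
    intro r hr
    rcases List.mem_or_eq_of_mem_set hr with hr' | hr'
    · exact h2 _ hr'
    · subst hr'
      rw [List.length_set, List.getD_eq_getElem?_getD, List.getElem?_eq_getElem hl]
      exact h2 _ (List.getElem_mem hl)
  · rw [List.set_eq_of_length_le hl]
    exact ⟨h1, h2⟩

theorem pvVget_vset_self (row col : Int) (v : List (List Bool)) (y x : Int)
    (hsh : PvShape row col v) (hg : PvGood row col (y, x)) :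
    pvVget (pvVset v y x) y x = true := by
  obtain ⟨hy0, hy1, hx0, hx1⟩ := hg
  obtain ⟨h1, h2⟩ := hsh
  have hyl : y.toNat < v.length := by omega
  simp only [pvVget, pvVset, List.getD_eq_getElem?_getD]
  rw [List.getElem?_set_self hyl]
  have hrow : (v[y.toNat]?.getD []).length = col.toNat := by
    rw [List.getElem?_eq_getElem hyl]
    exact h2 _ (List.getElem_mem hyl)
  have hxl : x.toNat < (v[y.toNat]?.getD []).length := by omega
  simp [List.getElem?_set_self hxl]

theorem pvMu_vset (row col : Int) (v : List (List Bool)) (y x : Int)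
    (hsh : PvShape row col v) (hg : PvGood row col (y, x))
    (hun : pvVget v y x = false) : pvMu (pvVset v y x) + 1 = pvMu v := by
  obtain ⟨hy0, hy1, hx0, hx1⟩ := hg
  obtain ⟨h1, h2⟩ := hsh
  have hyl : y.toNat < v.length := by omega
  have hrow : v[y.toNat].length = col.toNat := h2 _ (List.getElem_mem hyl)
  have hxl : x.toNat < v[y.toNat].length := by omega
  have hgd : v.getD y.toNat [] = v[y.toNat] := by
    rw [List.getD_eq_getElem?_getD, List.getElem?_eq_getElem hyl]; rfl
  have hval : v[y.toNat][x.toNat] = false := by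
    simp only [pvVget, List.getD_eq_getElem?_getD, List.getElem?_eq_getElem hyl,
      Option.getD_some, List.getElem?_eq_getElem hxl] at hun
    simpa using hun
  set f : List Bool → Nat := fun r => r.countP (fun b => !b) with hf
  have hmap : (pvVset v y x).map f = (v.map f).set y.toNat (f (v[y.toNat].set x.toNat true)) := by
    unfold pvVset
    rw [hgd, List.map_set]
  have hLlen : y.toNat < (v.map f).length := by simpa using hyl
  have hnew : f (v[y.toNat].set x.toNat true) + 1 = f v[y.toNat] := by
    rw [hf]
    simp only []
    rw [List.countP_set hxl]
    have hpos : 0 < v[y.toNat].countP (fun b => !b) :=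
      List.countP_pos_iff.mpr ⟨false, by rw [← hval]; exact List.getElem_mem hxl, by simp⟩
    simp [hval]
    omega
  have hsum1 : pvMu (pvVset v y x) =
      ((v.map f).take y.toNat).sum + f (v[y.toNat].set x.toNat true) +
        ((v.map f).drop (y.toNat + 1)).sum := by
    unfold pvMu
    rw [hmap, List.sum_set, if_pos hLlen]
  have hsum2 : pvMu v =
      ((v.map f).take y.toNat).sum + f v[y.toNat] + ((v.map f).drop (y.toNat + 1)).sum := by
    unfold pvMu
    rw [← List.sum_take_add_sum_drop (v.map f) y.toNat, ← List.getElem_cons_drop hLlen]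
    simp [List.sum_cons]
    ring
  omega

theorem pvSlide_good (board : List String) (row col : Int) (fuel : Nat)
    (y x dy dx : Int) (hg : PvGood row col (y, x)) :
    PvGood row col (pvSlide board row col fuel y x dy dx) := by
  induction fuel generalizing y x with
  | zero => exact hg
  | succ f ih =>
    rw [pvSlide]
    split
    · exact hg
    · rename_i hcond
      push Not at hcond
      exact ih (y + dy) (x + dx) ⟨hcond.2.2.1, hcond.2.2.2.1, hcond.1, hcond.2.1⟩

theorem pvStops_good (board : List String) (row col : Int) (p : Int × Int)
    (hg : PvGood row col p) : ∀ q ∈ pvStops board row col p.1 p.2, PvGood row col q := by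
  intro q hq
  unfold pvStops at hq
  obtain ⟨d, _, hd⟩ := List.mem_map.mp (List.mem_of_mem_filter hq)
  exact hd ▸ pvSlide_good board row col _ p.1 p.2 d.1 d.2 (by simpa using hg)

theorem pvScanInner_inv (board : List String) (row col : Int) (c : Char) (y : Int)
    (hy : 0 ≤ y ∧ y < row) :
    ∀ (l : List Int) (acc : Option (Int × Int)),
    (∀ x ∈ l, 0 ≤ x ∧ x < col) →
    (acc = none ∨ ∃ p, acc = some p ∧ PvGood row col p) →
    (l.foldl (fun acc x => if pvCell board y x = c then some (y, x) else acc) acc) = none ∨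
      ∃ p, (l.foldl (fun acc x => if pvCell board y x = c then some (y, x) else acc) acc) = some p ∧
        PvGood row col p := by
  intro l
  induction l with
  | nil => intro acc _ h; exact h
  | cons x xs ih =>
    intro acc hm h
    rw [List.foldl_cons]
    refine ih _ (fun z hz => hm z (List.mem_cons_of_mem _ hz)) ?_
    by_cases hc : pvCell board y x = c
    · right
      exact ⟨(y, x), by rw [if_pos hc], ⟨hy.1, hy.2, (hm x List.mem_cons_self).1, (hm x List.mem_cons_self).2⟩⟩
    · rw [if_neg hc]; exact h

theorem pvScan_good (board : List String) (row col : Int) (c : Char) (p : Int × Int)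
    (h : pvScan board row col c = some p) : PvGood row col p := by
  unfold pvScan at h
  have main : ∀ (l : List Int) (acc : Option (Int × Int)),
      (∀ y ∈ l, 0 ≤ y ∧ y < row) →
      (acc = none ∨ ∃ q, acc = some q ∧ PvGood row col q) →
      ((l.foldl (fun acc y =>
          (PySem.List.pyRange 0 col 1).foldl
            (fun acc x => if pvCell board y x = c then some (y, x) else acc) acc) acc) = none ∨
        ∃ q, (l.foldl (fun acc y =>
          (PySem.List.pyRange 0 col 1).foldl
            (fun acc x => if pvCell board y x = c then some (y, x) else acc) acc) acc) = some q ∧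
          PvGood row col q) := by
    intro l
    induction l with
    | nil => intro acc _ h; exact h
    | cons z zs ih =>
      intro acc hm h
      rw [List.foldl_cons]
      refine ih _ (fun w hw => hm w (List.mem_cons_of_mem _ hw)) ?_
      exact pvScanInner_inv board row col c z (hm z List.mem_cons_self) _ acc
        (fun x hx => (PySem.List.mem_pyRange_one.mp hx)) h
  rcases main (PySem.List.pyRange 0 row 1) none
      (fun y hy => PySem.List.mem_pyRange_one.mp hy) (Or.inl rfl) with h' | ⟨q, hq, hgq⟩
  · rw [h] at h'; cases h'
  · rw [h] at hq; cases hq; exact hgq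

theorem pvScanInner_ne_none (board : List String) (_col : Int) (c : Char) (y : Int) :
    ∀ (l : List Int) (acc : Option (Int × Int)), acc ≠ none →
    (l.foldl (fun acc x => if pvCell board y x = c then some (y, x) else acc) acc) ≠ none := by
  intro l
  induction l with
  | nil => intro acc h; exact h
  | cons x xs ih =>
    intro acc h
    rw [List.foldl_cons]
    refine ih _ ?_
    by_cases hc : pvCell board y x = c
    · rw [if_pos hc]; simp
    · rw [if_neg hc]; exact h

theorem pvScanInner_hit (board : List String) (col : Int) (c : Char) (y x : Int)
    (hx0 : 0 ≤ x) (hx : x < col) (hc : pvCell board y x = c) (acc : Option (Int × Int)) :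
    ((PySem.List.pyRange 0 col 1).foldl
      (fun acc x => if pvCell board y x = c then some (y, x) else acc) acc) ≠ none := by
  obtain ⟨l1, l2, hsplit⟩ := List.append_of_mem (PySem.List.mem_pyRange_one.mpr ⟨hx0, hx⟩)
  rw [hsplit, List.foldl_append, List.foldl_cons, if_pos hc]
  exact pvScanInner_ne_none board col c y l2 _ (by simp)

theorem pvScan_isSome (board : List String) (row col : Int) (c : Char)
    (y x : Int) (hy0 : 0 ≤ y) (hy : y < row) (hx0 : 0 ≤ x) (hx : x < col)
    (hc : pvCell board y x = c) : pvScan board row col c ≠ none := by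
  unfold pvScan
  obtain ⟨l1, l2, hsplit⟩ := List.append_of_mem (PySem.List.mem_pyRange_one.mpr ⟨hy0, hy⟩)
  rw [hsplit, List.foldl_append, List.foldl_cons]
  have hmono : ∀ (l : List Int) (acc : Option (Int × Int)), acc ≠ none →
      (l.foldl (fun acc y =>
        (PySem.List.pyRange 0 col 1).foldl
          (fun acc x => if pvCell board y x = c then some (y, x) else acc) acc) acc) ≠ none := by
    intro l
    induction l with
    | nil => intro acc h; exact h
    | cons z zs ih =>
      intro acc h
      rw [List.foldl_cons]
      exact ih _ (pvScanInner_ne_none board col c z _ acc h)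
  exact hmono l2 _ (pvScanInner_hit board col c y x hx0 hx hc _)

-- B's inner marking fold: accumulator irrelevance
theorem pvFoldB_acc (qs : List (Int × Int)) : ∀ (v : List (List Bool)) (acc : List (Int × Int)),
    qs.foldl pvStepB (v, acc) =
      ((qs.foldl pvStepB (v, [])).1, acc ++ (qs.foldl pvStepB (v, [])).2) := by
  induction qs with
  | nil => intro v acc; simp
  | cons q qs ih =>
    intro v acc
    rw [List.foldl_cons, List.foldl_cons]
    by_cases h : pvVget v q.1 q.2 = true
    · simp only [pvStepB, h, if_pos]
      exact ih v acc
    · simp only [pvStepB, h, Bool.false_eq_true, if_false]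
      simp only [List.nil_append]
      rw [ih (pvVset v q.1 q.2) (acc ++ [q]), ih (pvVset v q.1 q.2) [q]]
      simp

theorem pvFoldB_mono (qs : List (Int × Int)) : ∀ (v : List (List Bool)) (acc : List (Int × Int))
    (y x : Int), pvVget v y x = true →
    pvVget (qs.foldl pvStepB (v, acc)).1 y x = true := by
  induction qs with
  | nil => intro v acc y x h; exact h
  | cons q qs ih =>
    intro v acc y x h
    rw [List.foldl_cons]
    by_cases hq : pvVget v q.1 q.2 = true
    · simp only [pvStepB, hq, if_pos]
      exact ih v acc y x h
    · simp only [pvStepB, hq, Bool.false_eq_true, if_false]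
      exact ih _ _ y x (pvVget_vset_mono v q.1 q.2 y x h)

theorem pvFoldB_shape (row col : Int) (qs : List (Int × Int)) : ∀ (v : List (List Bool))
    (acc : List (Int × Int)), PvShape row col v →
    PvShape row col (qs.foldl pvStepB (v, acc)).1 := by
  induction qs with
  | nil => intro v acc h; exact h
  | cons q qs ih =>
    intro v acc h
    rw [List.foldl_cons]
    by_cases hq : pvVget v q.1 q.2 = true
    · simp only [pvStepB, hq, if_pos]
      exact ih v acc h
    · simp only [pvStepB, hq, Bool.false_eq_true, if_false]
      exact ih _ _ (pvShape_vset row col v q.1 q.2 h)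

theorem pvFoldB_inv (row col : Int) (qs : List (Int × Int)) : ∀ (v : List (List Bool))
    (acc : List (Int × Int)), PvShape row col v →
    (∀ q ∈ qs, PvGood row col q) →
    (∀ p ∈ acc, PvGood row col p ∧ pvVget v p.1 p.2 = true) →
    ∀ p ∈ (qs.foldl pvStepB (v, acc)).2,
      PvGood row col p ∧ pvVget (qs.foldl pvStepB (v, acc)).1 p.1 p.2 = true := by
  induction qs with
  | nil => intro v acc _ _ hacc; exact hacc
  | cons q qs ih =>
    intro v acc hsh hqs hacc
    rw [List.foldl_cons]
    by_cases hq : pvVget v q.1 q.2 = true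
    · simp only [pvStepB, hq, if_pos]
      exact ih v acc hsh (fun z hz => hqs z (List.mem_cons_of_mem _ hz)) hacc
    · simp only [pvStepB, hq, Bool.false_eq_true, if_false]
      refine ih _ _ (pvShape_vset row col v q.1 q.2 hsh)
        (fun z hz => hqs z (List.mem_cons_of_mem _ hz)) ?_
      intro p hp
      rcases List.mem_append.mp hp with hp' | hp'
      · exact ⟨(hacc p hp').1, pvVget_vset_mono v q.1 q.2 p.1 p.2 (hacc p hp').2⟩
      · rw [List.mem_singleton.mp hp']
        exact ⟨hqs q List.mem_cons_self,
          pvVget_vset_self row col v q.1 q.2 hsh (by simpa using hqs q List.mem_cons_self)⟩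

theorem pvFoldB_mu (row col : Int) (qs : List (Int × Int)) : ∀ (v : List (List Bool))
    (acc : List (Int × Int)), PvShape row col v →
    (∀ q ∈ qs, PvGood row col q) →
    pvMu (qs.foldl pvStepB (v, acc)).1 + (qs.foldl pvStepB (v, acc)).2.length =
      pvMu v + acc.length := by
  induction qs with
  | nil => intro v acc _ _; rfl
  | cons q qs ih =>
    intro v acc hsh hqs
    rw [List.foldl_cons]
    by_cases hq : pvVget v q.1 q.2 = true
    · simp only [pvStepB, hq, if_pos]
      exact ih v acc hsh (fun z hz => hqs z (List.mem_cons_of_mem _ hz))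
    · simp only [pvStepB, hq, Bool.false_eq_true, if_false]
      have hmu := pvMu_vset row col v q.1 q.2 hsh
        (by simpa using hqs q List.mem_cons_self) (by simpa using hq)
      have := ih (pvVset v q.1 q.2) (acc ++ [q]) (pvShape_vset row col v q.1 q.2 hsh)
        (fun z hz => hqs z (List.mem_cons_of_mem _ hz))
      rw [List.length_append] at this
      simp at this
      omega

-- the level expansion used on the B side (with pvStops substituted for the table lookup)
def pvExpand (board : List String) (row col : Int) (level : List (Int × Int))
    (v : List (List Bool)) (acc : List (Int × Int)) :
    List (List Bool) × List (Int × Int) :=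
  level.foldl (fun st p => (pvStops board row col p.1 p.2).foldl pvStepB st) (v, acc)

theorem pvExpand_shape (row col : Int) (board : List String) (level : List (Int × Int)) :
    ∀ (v : List (List Bool)) (acc : List (Int × Int)), PvShape row col v →
    PvShape row col (pvExpand board row col level v acc).1 := by
  induction level with
  | nil => intro v acc h; exact h
  | cons p lv ih =>
    intro v acc h
    unfold pvExpand
    rw [List.foldl_cons]
    exact ih _ _ (pvFoldB_shape row col (pvStops board row col p.1 p.2) v acc h)

theorem pvExpand_inv (row col : Int) (board : List String) (level : List (Int × Int)) :
    ∀ (v : List (List Bool)) (acc : List (Int × Int)), PvShape row col v →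
    (∀ p ∈ level, PvGood row col p) →
    (∀ p ∈ acc, PvGood row col p ∧ pvVget v p.1 p.2 = true) →
    ∀ p ∈ (pvExpand board row col level v acc).2,
      PvGood row col p ∧ pvVget (pvExpand board row col level v acc).1 p.1 p.2 = true := by
  induction level with
  | nil => intro v acc _ _ hacc; exact hacc
  | cons p lv ih =>
    intro v acc hsh hl hacc
    unfold pvExpand
    rw [List.foldl_cons]
    set S := (pvStops board row col p.1 p.2).foldl pvStepB (v, acc) with hS
    refine ih S.1 S.2 ?_ (fun z hz => hl z (List.mem_cons_of_mem _ hz)) ?_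
    · exact pvFoldB_shape row col _ v acc hsh
    · exact pvFoldB_inv row col _ v acc hsh
        (pvStops_good board row col p (hl p List.mem_cons_self)) hacc

theorem pvExpand_mu (row col : Int) (board : List String) (level : List (Int × Int)) :
    ∀ (v : List (List Bool)) (acc : List (Int × Int)), PvShape row col v →
    (∀ p ∈ level, PvGood row col p) →
    pvMu (pvExpand board row col level v acc).1 +
        (pvExpand board row col level v acc).2.length =
      pvMu v + acc.length := by
  induction level with
  | nil => intro v acc _ _; rfl
  | cons p lv ih =>
    intro v acc hsh hl
    unfold pvExpand
    rw [List.foldl_cons]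
    set S := (pvStops board row col p.1 p.2).foldl pvStepB (v, acc) with hS
    have h1 := ih S.1 S.2 (pvFoldB_shape row col _ v acc hsh)
      (fun z hz => hl z (List.mem_cons_of_mem _ hz))
    have h2 := pvFoldB_mu row col (pvStops board row col p.1 p.2) v acc hsh
      (pvStops_good board row col p (hl p List.mem_cons_self))
    unfold pvExpand at h1
    have hSe : S = (S.1, S.2) := rfl
    rw [← hSe] at h1
    rw [← hS] at h2
    omega

-- per-cell expansion: A's fold over the four directions equals B's fold over the
-- filtered stop list, provided the popped cell itself is already marked
theorem pvStepA_eq_stepB (board : List String) (row col : Int) (l : List (Int × Int)) :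
    ∀ (v : List (List Bool)) (accB : List (Int × Int)) (y x t : Int),
    pvVget v y x = true →
    l.foldl (pvStepA board row col y x t) (v, accB.map (fun q => (q.1, q.2, t + 1))) =
      (((l.map (fun d => pvSlide board row col ((row + col).toNat + 1) y x d.1 d.2)).filter
          (fun q => q ≠ (y, x))).foldl pvStepB (v, accB) |>.1,
       ((l.map (fun d => pvSlide board row col ((row + col).toNat + 1) y x d.1 d.2)).filter
          (fun q => q ≠ (y, x))).foldl pvStepB (v, accB) |>.2.map (fun q => (q.1, q.2, t + 1))) := by
  induction l with
  | nil => intro v accB y x t _; rfl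
  | cons d l ih =>
    intro v accB y x t hv
    rw [List.foldl_cons, List.map_cons, List.filter_cons]
    set q := pvSlide board row col ((row + col).toNat + 1) y x d.1 d.2 with hq
    by_cases hqe : q = (y, x)
    · have hvq : pvVget v q.1 q.2 = true := by rw [hqe]; exact hv
      simp only [hqe, ne_eq, not_true_eq_false, decide_false, Bool.false_eq_true, if_false]
      have hA : pvStepA board row col y x t (v, accB.map (fun q => (q.1, q.2, t + 1))) d =
          (v, accB.map (fun q => (q.1, q.2, t + 1))) := by
        unfold pvStepA
        rw [← hq, hqe] at *
        simp [hv]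
      rw [hA]
      exact ih v accB y x t hv
    · simp only [ne_eq, hqe, not_false_eq_true, decide_true, if_true]
      rw [List.foldl_cons]
      by_cases hvq : pvVget v q.1 q.2 = true
      · have hA : pvStepA board row col y x t (v, accB.map (fun q => (q.1, q.2, t + 1))) d =
            (v, accB.map (fun q => (q.1, q.2, t + 1))) := by
          unfold pvStepA
          rw [← hq]
          simp [hvq]
        have hB : pvStepB (v, accB) q = (v, accB) := by
          unfold pvStepB
          simp [hvq]
        rw [hA, hB]
        exact ih v accB y x t hv
      · have hA : pvStepA board row col y x t (v, accB.map (fun q => (q.1, q.2, t + 1))) d =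
            (pvVset v q.1 q.2, (accB ++ [q]).map (fun q => (q.1, q.2, t + 1))) := by
          unfold pvStepA
          rw [← hq]
          simp [hvq]
        have hB : pvStepB (v, accB) q = (pvVset v q.1 q.2, accB ++ [q]) := by
          unfold pvStepB
          simp [hvq]
        rw [hA, hB]
        exact ih (pvVset v q.1 q.2) (accB ++ [q]) y x t
          (pvVget_vset_mono v q.1 q.2 y x hv)

theorem pvLoopA_nil (board : List String) (row col : Int) (g : Int × Int) (f : Nat)
    (v : List (List Bool)) : pvLoopA board row col g f v [] = -1 := by
  cases f <;> rfl

theorem pvLoopB_nil (tb : List (List (List (Int × Int)))) (g : Int × Int) (f : Nat)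
    (v : List (List Bool)) (d : Int) : pvLoopB tb g f v [] d = -1 := by
  cases f <;> rfl

theorem pvTableAt_eq (board : List String) (row col : Int) (p : Int × Int)
    (hg : PvGood row col p) :
    pvTableAt (pvTable board row col) p.1 p.2 = pvStops board row col p.1 p.2 := by
  obtain ⟨h0, h1, h2, h3⟩ := hg
  unfold pvTableAt pvTable
  rw [PySem.List.pyRange_one, PySem.List.pyRange_one]
  have hyn : p.1.toNat < ((row : Int) - 0).toNat := by omega
  have hxn : p.2.toNat < ((col : Int) - 0).toNat := by omega
  simp only [List.getD_eq_getElem?_getD, List.getElem?_map, List.getElem?_range hyn,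
    List.getElem?_range hxn, Option.map_some, Option.getD_some]
  rw [show ((0 : Int) + (p.1.toNat : Int)) = p.1 by omega,
    show ((0 : Int) + (p.2.toNat : Int)) = p.2 by omega]

-- A consumes one unit of fuel per pop, so a level of length k turns fuel k+g into g
theorem pvChunk (board : List String) (row col : Int) (goal : Int × Int)
    (level : List (Int × Int)) :
    ∀ (accB : List (Int × Int)) (v : List (List Bool)) (g : Nat) (d : Int),
    PvShape row col v →
    (∀ p ∈ level, PvGood row col p ∧ pvVget v p.1 p.2 = true) →
    pvLoopA board row col goal (level.length + g) v
        (level.map (fun p => (p.1, p.2, d)) ++ accB.map (fun q => (q.1, q.2, d + 1))) =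
      (if goal ∈ level then d
       else
        pvLoopA board row col goal g (pvExpand board row col level v accB).1
          ((pvExpand board row col level v accB).2.map (fun q => (q.1, q.2, d + 1)))) := by
  induction level with
  | nil =>
    intro accB v g d _ _
    rw [if_neg (List.not_mem_nil)]
    simp only [List.length_nil, Nat.zero_add, List.map_nil, List.nil_append]
    rfl
  | cons p lv ih =>
    intro accB v g d hsh hl
    have hfuel : (p :: lv).length + g = (lv.length + g) + 1 := by
      simp [List.length_cons]; omega
    rw [hfuel]
    simp only [List.map_cons, List.cons_append]
    rw [pvLoopA]
    by_cases hg : goal.1 = p.1 ∧ goal.2 = p.2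
    · have hgp : goal = p := Prod.ext hg.1 hg.2
      rw [if_pos hg, if_pos (hgp ▸ List.mem_cons_self)]
    · rw [if_neg hg]
      have hv : pvVget v p.1 p.2 = true := (hl p List.mem_cons_self).2
      have hstep := pvStepA_eq_stepB board row col pvWay v [] p.1 p.2 d hv
      simp only [List.map_nil] at hstep
      have hstops : (pvWay.map
            (fun dd => pvSlide board row col ((row + col).toNat + 1) p.1 p.2 dd.1 dd.2)).filter
            (fun q => q ≠ (p.1, p.2)) = pvStops board row col p.1 p.2 := by
        unfold pvStops; rfl
      rw [hstops] at hstep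
      set T := (pvStops board row col p.1 p.2).foldl pvStepB
        (v, ([] : List (Int × Int))) with hT
      rw [hstep]
      simp only []
      have hq : lv.map (fun p => (p.1, p.2, d)) ++ accB.map (fun q => (q.1, q.2, d + 1)) ++
            T.2.map (fun q => (q.1, q.2, d + 1)) =
          lv.map (fun p => (p.1, p.2, d)) ++ (accB ++ T.2).map (fun q => (q.1, q.2, d + 1)) := by
        rw [List.map_append, List.append_assoc]
      rw [hq]
      have hshT : PvShape row col T.1 := pvFoldB_shape row col _ v [] hsh
      have hlT : ∀ z ∈ lv, PvGood row col z ∧ pvVget T.1 z.1 z.2 = true := by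
        intro z hz
        exact ⟨(hl z (List.mem_cons_of_mem _ hz)).1,
          pvFoldB_mono _ v [] z.1 z.2 (hl z (List.mem_cons_of_mem _ hz)).2⟩
      rw [ih (accB ++ T.2) T.1 g d hshT hlT]
      have hexp : pvExpand board row col (p :: lv) v accB =
          pvExpand board row col lv T.1 (accB ++ T.2) := by
        unfold pvExpand
        rw [List.foldl_cons, pvFoldB_acc (pvStops board row col p.1 p.2) v accB, ← hT]
      by_cases hgl : goal ∈ lv
      · rw [if_pos hgl, if_pos (List.mem_cons_of_mem p hgl)]
      · have hnotc : goal ∉ p :: lv := by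
          intro hc
          rcases List.mem_cons.mp hc with hc' | hc'
          · exact hg ⟨by rw [hc'], by rw [hc']⟩
          · exact hgl hc'
        rw [if_neg hgl, if_neg hnotc, hexp]

theorem pvMain (board : List String) (row col : Int) (goal : Int × Int) :
    ∀ (fb : Nat) (v : List (List Bool)) (frontier : List (Int × Int)) (d : Int) (fa : Nat),
    PvShape row col v →
    (∀ p ∈ frontier, PvGood row col p ∧ pvVget v p.1 p.2 = true) →
    frontier.length + pvMu v ≤ fa → pvMu v + 1 ≤ fb →
    pvLoopA board row col goal fa v (frontier.map (fun p => (p.1, p.2, d))) =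
      pvLoopB (pvTable board row col) goal fb v frontier d := by
  intro fb
  induction fb with
  | zero => intro v frontier d fa _ _ _ hfb; omega
  | succ k ihf =>
    intro v frontier d fa hsh hfr hfa hfb
    match hF : frontier with
    | [] =>
      rw [List.map_nil, pvLoopA_nil, pvLoopB]
      rw [if_pos rfl]
    | p :: fr =>
      rw [show fa = (p :: fr).length + (fa - (p :: fr).length) by
        have := hfa; simp [List.length_cons] at this ⊢; omega]
      rw [show ((p :: fr).map (fun p => (p.1, p.2, d))) =
          (p :: fr).map (fun p => (p.1, p.2, d)) ++
            ([] : List (Int × Int)).map (fun q => (q.1, q.2, d + 1)) by simp]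
      rw [pvChunk board row col goal (p :: fr) [] v (fa - (p :: fr).length) d hsh hfr]
      rw [pvLoopB]
      rw [if_neg (List.cons_ne_nil p fr)]
      have htb : (p :: fr).foldl
          (fun st z => (pvTableAt (pvTable board row col) z.1 z.2).foldl pvStepB st)
          (v, ([] : List (Int × Int))) = pvExpand board row col (p :: fr) v [] := by
        unfold pvExpand
        refine PySem.List.foldl_congr_mem (p :: fr)
          (fun st z => (pvTableAt (pvTable board row col) z.1 z.2).foldl pvStepB st)
          (fun st z => (pvStops board row col z.1 z.2).foldl pvStepB st)
          (v, ([] : List (Int × Int))) ?_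
        intro acc z hz
        simp only [pvTableAt_eq board row col z (hfr z hz).1]
      rw [htb]
      by_cases hgf : goal ∈ p :: fr
      · rw [if_pos hgf, if_pos hgf]
      · rw [if_neg hgf, if_neg hgf]
        change pvLoopA board row col goal (fa - (p :: fr).length)
            (pvExpand board row col (p :: fr) v []).1
            (List.map (fun q => (q.1, q.2, d + 1)) (pvExpand board row col (p :: fr) v []).2) =
          pvLoopB (pvTable board row col) goal k (pvExpand board row col (p :: fr) v []).1
            (pvExpand board row col (p :: fr) v []).2 (d + 1)
        set E := pvExpand board row col (p :: fr) v [] with hE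
        have hshE : PvShape row col E.1 := pvExpand_shape row col board _ v [] hsh
        have hinvE : ∀ z ∈ E.2, PvGood row col z ∧ pvVget E.1 z.1 z.2 = true :=
          pvExpand_inv row col board _ v [] hsh (fun z hz => (hfr z hz).1) (by simp)
        have hmuE : pvMu E.1 + E.2.length = pvMu v + ([] : List (Int × Int)).length :=
          pvExpand_mu row col board _ v [] hsh (fun z hz => (hfr z hz).1)
        simp only [List.length_nil, Nat.add_zero] at hmuE
        match hE2 : E.2 with
        | [] =>
          rw [List.map_nil, pvLoopA_nil, pvLoopB_nil]
        | q :: qs =>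
          rw [← hE2]
          refine ihf E.1 E.2 (d + 1) (fa - (p :: fr).length) hshE hinvE ?_ ?_
          · simp only [List.length_cons] at hfa ⊢
            omega
          · have : 0 < E.2.length := by rw [hE2]; simp
            omega

theorem pvVget_replicate (n m : Nat) (y x : Int) :
    pvVget (List.replicate n (List.replicate m false)) y x = false := by
  unfold pvVget
  rw [List.getD_eq_getElem?_getD, List.getD_eq_getElem?_getD, List.getElem?_replicate]
  split_ifs with h
  · rw [Option.getD_some, List.getElem?_replicate]
    split_ifs <;> rfl
  · rw [Option.getD_none]
    rfl

theorem pvMu_replicate (n m : Nat) :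
    pvMu (List.replicate n (List.replicate m false)) = n * m := by
  unfold pvMu
  rw [List.map_replicate, List.countP_replicate]
  simp [List.sum_replicate]

theorem pvShape_replicate (board : List String) (col : Int) :
    PvShape (board.length : Int) col
      (List.replicate board.length (List.replicate col.toNat false)) := by
  constructor
  · simp
  · intro r hr
    rw [List.eq_of_mem_replicate hr]
    simp

theorem pvCell_mem (board : List String) (c : Char) (s : String) (hs : s ∈ board)
    (hc : c ∈ s.toList.take (board.headD "").toList.length) :
    ∃ y x : Int, 0 ≤ y ∧ y < (board.length : Int) ∧ 0 ≤ x ∧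
      x < ((board.headD "").toList.length : Int) ∧ pvCell board y x = c := by
  obtain ⟨y, hy, hyv⟩ := List.getElem_of_mem hs
  obtain ⟨x, hx, hxv⟩ := List.getElem_of_mem hc
  rw [List.getElem_take] at hxv
  have hxlt : x < (board.headD "").toList.length ∧ x < s.toList.length := by
    rw [List.length_take] at hx
    omega
  refine ⟨(y : Int), (x : Int), by omega, by exact_mod_cast hy, by omega,
    by exact_mod_cast hxlt.1, ?_⟩
  unfold pvCell
  simp only [PySem.List.pyGet?_natCast]
  rw [List.getElem?_eq_getElem hy, Option.getD_some, hyv,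
    List.getElem?_eq_getElem hxlt.2, Option.getD_some]
  exact hxv

-- ===== VERDICT (by name: the statement is the Claim_ definition above) =====
theorem solution_spec : Claim_equal_solution := by
  unfold Claim_equal_solution Spec_solution
  intro board _ hpre
  obtain ⟨hne, hlen, ⟨sR, hsRmem, hRin⟩, ⟨sG, hsGmem, hGin⟩⟩ := hpre
  obtain ⟨yR, xR, hR1, hR2, hR3, hR4, hRcell⟩ := pvCell_mem board 'R' sR hsRmem hRin
  obtain ⟨yG, xG, hG1, hG2, hG3, hG4, hGcell⟩ := pvCell_mem board 'G' sG hsGmem hGin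
  set row : Int := (board.length : Int) with hrow
  set col : Int := ((board.headD "").toList.length : Int) with hcol
  have hscanR := pvScan_isSome board row col 'R' yR xR hR1 hR2 hR3 hR4 hRcell
  have hscanG := pvScan_isSome board row col 'G' yG xG hG1 hG2 hG3 hG4 hGcell
  cases hR : pvScan board row col 'R' with
  | none => exact absurd hR hscanR
  | some r =>
    cases hG : pvScan board row col 'G' with
    | none => exact absurd hG hscanG
    | some g =>
      have hgoodr : PvGood row col r := pvScan_good board row col 'R' r hR
      simp only [solution, solution_alt, ← hrow, ← hcol, hR, hG]
      set v0 := pvVset (List.replicate board.length (List.replicate col.toNat false)) r.1 r.2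
        with hv0
      have hshrep := pvShape_replicate board col
      have hsh0 : PvShape row col v0 := pvShape_vset row col _ r.1 r.2 hshrep
      have hvget0 : pvVget v0 r.1 r.2 = true := by
        rw [hv0]
        exact pvVget_vset_self row col _ r.1 r.2 hshrep (by simpa using hgoodr)
      have hmu0 : pvMu v0 + 1 = board.length * col.toNat := by
        rw [hv0, pvMu_vset row col _ r.1 r.2 hshrep (by simpa using hgoodr)
          (pvVget_replicate _ _ _ _), pvMu_replicate]
      have hmain := pvMain board row col g (board.length * col.toNat + 1) v0 [r] 0
        (board.length * col.toNat + 1) hsh0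
        (by intro p hp; rw [List.mem_singleton.mp hp]; exact ⟨hgoodr, hvget0⟩)
        (by simp; omega) (by omega)
      rw [show ([r].map (fun p => (p.1, p.2, (0 : Int)))) = [(r.1, r.2, (0 : Int))] by simp]
        at hmain
      exact hmain
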